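-- pv_equiv track=rewrite | github.com/nilomr/pykanto | src/greti/sequencing/seqfinder.py | remove_long_ngrams
-- ===== SOURCE A (Python) =====
-- def remove_long_ngrams(minus_palindromes):
--     # Remove collapsible sequences
--     remove = [
--         seq2
--         for seq2 in minus_palindromes
--         for seq in minus_palindromes
--         if seq != seq2
--         and seq in seq2
--         and not [
--             substr2 for substr2 in seq2 if substr2 not in seq
--         ]  # contains no new notes
--     ]
--     return [seq for seq in minus_palindromes if seq not in remove]
-- ===== SOURCE B (Python) =====
-- def remove_long_ngrams(minus_palindromes):
--     # A sequence is removed iff some value-distinct sequence with the SAME character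
--     # set is a substring of it (substring gives one char-set inclusion, "no new
--     # notes" the other).  Bucket the sequences by canonical character-set key once,
--     # then each sequence only scans its own bucket.
--     keys = [''.join(sorted(set(s))) for s in minus_palindromes]
--     buckets = {}
--     for k, s in zip(keys, minus_palindromes):
--         buckets.setdefault(k, []).append(s)
--     return [s for k, s in zip(keys, minus_palindromes)
--             if not any(t != s and t in s for t in buckets[k])]
-- ===== Notes on version B (the rewrite author's own statement) =====
-- stated objective: faster
-- what changed: Instead of materializing a quadratic 'remove' list via a double comprehension and then filtering by linear list membership, B buckets the sequences once by their canonical character-set key (a match forces identical character sets), and keeps a sequence iff no value-distinct member of its own bucket is a substring of it.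
import Mathlib
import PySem

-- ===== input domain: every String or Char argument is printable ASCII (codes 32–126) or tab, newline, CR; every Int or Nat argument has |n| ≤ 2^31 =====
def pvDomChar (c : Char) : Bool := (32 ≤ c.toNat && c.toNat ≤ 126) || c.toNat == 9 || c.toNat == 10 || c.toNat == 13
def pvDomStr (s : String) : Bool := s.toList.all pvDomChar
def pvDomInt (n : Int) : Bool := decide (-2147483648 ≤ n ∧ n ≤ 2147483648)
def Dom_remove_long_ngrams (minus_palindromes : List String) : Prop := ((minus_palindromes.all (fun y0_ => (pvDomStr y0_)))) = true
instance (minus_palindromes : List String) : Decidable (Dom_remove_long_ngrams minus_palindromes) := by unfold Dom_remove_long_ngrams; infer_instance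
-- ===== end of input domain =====

-- B replaces A's quadratic remove-list plus linear membership scans by a one-pass
-- bucketing of the sequences by canonical character-set key (objective: faster).


-- ===== PORT A =====
-- remove = [seq2 for seq2 in mp for seq in mp if seq != seq2 and seq in seq2
--           and not [substr2 for substr2 in seq2 if substr2 not in seq]]
-- return [seq for seq in mp if seq not in remove]
def remove_long_ngrams (minus_palindromes : List String) : List String :=
  let remove := minus_palindromes.flatMap (fun seq2 =>
    minus_palindromes.filterMap (fun seq =>
      if seq ≠ seq2 ∧ PySem.Str.isIn seq seq2 = true ∧
          seq2.toList.filter (fun substr2 => !(PySem.Str.isIn (String.ofList [substr2]) seq)) = []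
      then some seq2 else none))
  minus_palindromes.filter (fun seq => !(remove.contains seq))

-- ===== PORT B =====
-- ''.join(sorted(set(s))): the join of single-character strings is the string of
-- the sorted deduplicated character list (exact: String.ofList of that List Char).
def pvCharKey (s : String) : String :=
  String.ofList (PySem.List.sorted (PySem.Set.ofList s.toList) (fun c => c) false)

-- buckets.setdefault(k, []).append(s) is exactly Dict.modify k [] (· ++ [s]).
def remove_long_ngrams_alt (minus_palindromes : List String) : List String :=
  let keys := minus_palindromes.map pvCharKey
  let buckets := (keys.zip minus_palindromes).foldl
      (fun d p => d.modify p.1 [] (· ++ [p.2])) PySem.Dict.empty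
  ((keys.zip minus_palindromes).filter
      (fun p => !((buckets.getD p.1 []).any
        (fun t => t != p.2 && PySem.Str.isIn t p.2)))).map (·.2)

-- ===== PRECONDITION & SPEC =====
def Spec_remove_long_ngrams (minus_palindromes : List String) (out : List String) : Prop := out = remove_long_ngrams_alt minus_palindromes
instance (minus_palindromes : List String) (out : List String) : Decidable (Spec_remove_long_ngrams minus_palindromes out) := by unfold Spec_remove_long_ngrams; infer_instance

-- ===== CLAIM (what is proved, stated in full; the proofs are below) =====
def Claim_equal_remove_long_ngrams : Prop := ∀ (minus_palindromes : List String), Dom_remove_long_ngrams minus_palindromes → Spec_remove_long_ngrams minus_palindromes (remove_long_ngrams minus_palindromes)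

-- ===== LEMMAS AND PROOFS =====

-- membership in the canonical key is character membership
lemma mem_pvCharKey (c : Char) (s : String) : c ∈ (pvCharKey s).toList ↔ c ∈ s.toList := by
  unfold pvCharKey
  rw [String.toList_ofList, PySem.List.mem_sorted, PySem.Set.mem_ofList]

-- key equality says exactly "same character set"
lemma pvCharKey_eq_iff (t s : String) :
    pvCharKey t = pvCharKey s ↔ (∀ c ∈ t.toList, c ∈ s.toList) ∧ (∀ c ∈ s.toList, c ∈ t.toList) := by
  constructor
  · intro h
    refine ⟨fun c hc => ?_, fun c hc => ?_⟩
    · exact (mem_pvCharKey c s).mp (h ▸ (mem_pvCharKey c t).mpr hc)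
    · exact (mem_pvCharKey c t).mp (h ▸ (mem_pvCharKey c s).mpr hc)
  · rintro ⟨h1, h2⟩
    unfold pvCharKey
    congr 1
    apply PySem.List.sorted_eq_sorted_of_perm _ _ _ (fun _ _ h => h)
    apply (List.perm_ext_iff_of_nodup (PySem.Set.nodup_ofList _) (PySem.Set.nodup_ofList _)).mpr
    intro a
    rw [PySem.Set.mem_ofList, PySem.Set.mem_ofList]
    exact ⟨fun h => h1 a h, fun h => h2 a h⟩

-- a single-character substring test is character membership
lemma isIn_singleton (c : Char) (s : List Char) :
    PySem.Chars.isIn [c] s = true ↔ c ∈ s := by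
  rw [PySem.Chars.isIn_iff_infix]
  exact List.singleton_infix_iff c s

-- A's removal condition on x ↔ B's bucket condition on x
lemma cond_iff (mp : List String) (x : String) :
    (∃ t ∈ mp, t ≠ x ∧ PySem.Str.isIn t x = true ∧
        x.toList.filter (fun c => !(PySem.Str.isIn (String.ofList [c]) t)) = []) ↔
    (∃ t ∈ mp, pvCharKey t = pvCharKey x ∧ t ≠ x ∧ PySem.Str.isIn t x = true) := by
  constructor
  · rintro ⟨t, ht, hne, hin, hfil⟩
    refine ⟨t, ht, ?_, hne, hin⟩
    rw [pvCharKey_eq_iff]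
    refine ⟨fun c hc => ((PySem.Str.isIn_iff_infix t x).mp hin).subset hc, fun c hc => ?_⟩
    have := (List.filter_eq_nil_iff).mp hfil c hc
    simpa [isIn_singleton] using this
  · rintro ⟨t, ht, hkey, hne, hin⟩
    refine ⟨t, ht, hne, hin, ?_⟩
    rw [List.filter_eq_nil_iff]
    intro c hc
    have := ((pvCharKey_eq_iff t x).mp hkey).2 c hc
    simpa [isIn_singleton] using this

-- ===== VERDICT (by name: the statement is the Claim_ definition above) =====
theorem remove_long_ngrams_spec : Claim_equal_remove_long_ngrams := by
  intro mp _
  show remove_long_ngrams mp = remove_long_ngrams_alt mp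
  unfold remove_long_ngrams remove_long_ngrams_alt
  have hzip : (mp.map pvCharKey).zip mp = mp.map (fun u => (pvCharKey u, u)) := by
    simpa using List.zip_map' (f := pvCharKey) (g := id) (l := mp)
  simp only [hzip, List.filter_map, List.map_map]
  have hb : ∀ k, ((mp.map (fun u => (pvCharKey u, u))).foldl
      (fun d p => d.modify p.1 [] (· ++ [p.2])) PySem.Dict.empty).getD k []
      = mp.filter (fun u => pvCharKey u == k) := by
    intro k
    rw [PySem.Dict.getD_foldl_modify_append]
    simp [List.filter_map, List.map_map, Function.comp_def]
  simp only [hb, Function.comp_def]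
  rw [List.map_id']
  apply List.filter_congr
  intro x hx
  congr 1
  apply Bool.eq_iff_iff.mpr
  rw [List.contains_iff_mem, List.any_eq_true]
  simp only [List.mem_flatMap, List.mem_filterMap, List.mem_filter,
    Option.ite_none_right_eq_some, Option.some.injEq, Bool.and_eq_true, bne_iff_ne, beq_iff_eq]
  constructor
  · rintro ⟨s2, hs2, t, ht, hC, heq⟩
    subst heq
    have := (cond_iff mp s2).mp ⟨t, ht, hC⟩
    rcases this with ⟨u, hu, hk, hne, hin⟩
    exact ⟨u, ⟨hu, hk⟩, hne, hin⟩
  · rintro ⟨u, ⟨hu, hk⟩, hne, hin⟩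
    have := (cond_iff mp x).mpr ⟨u, hu, hk, hne, hin⟩
    rcases this with ⟨t, ht, hC⟩
    exact ⟨x, hx, t, ht, hC, rfl⟩
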